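-- pv_equiv track=rewrite | github.com/AGaziev/SubString_Search | FASearch.py | getFAForSubstring
-- ===== SOURCE A (Python) =====
-- def getFAForSubstring(s):
--     alphabet = getAlphabet(s)
--     FA = [[0 for i in range(len(alphabet))] for i in range(len(s))]
--     FA[0][0] = 1
--     length = 0
--     for i in range(1, len(s)):
--         FA[i] = FA[length].copy()                   #
--         FA[i][alphabet.index(s[i])] = i + 1         # алгоритм построение конечного автомата
--         length = FA[length][alphabet.index(s[i])]   #
--     return FA
--
-- def getAlphabet(string):
--     alphabet = []
--     for i in string:
--         if i not in alphabet:
--             alphabet.append(i)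
--     return alphabet
-- ===== SOURCE B (Python) =====
-- def getFAForSubstring(s):
--     # prefix-function (KMP) based construction; row i inherited through the failure link
--     alphabet = list(dict.fromkeys(s))
--     col = {c: j for j, c in enumerate(alphabet)}
--     n = len(s)
--     m = len(alphabet)
--     pi = [0] * n
--     for i in range(1, n):
--         k = pi[i - 1]
--         while k > 0 and s[k] != s[i]:
--             k = pi[k - 1]
--         pi[i] = k + 1 if s[k] == s[i] else 0
--     FA = [[0] * m for _ in range(n)]
--     FA[0][0] = 1
--     for i in range(1, n):
--         fail = FA[pi[i - 1]]
--         ci = col[s[i]]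
--         FA[i] = [i + 1 if j == ci else fail[j] for j in range(m)]
--     return FA
-- ===== Notes on version B (the rewrite author's own statement) =====
-- stated objective: alternative
-- what changed: B first computes the KMP prefix (failure) function in its own pass and then fills each automaton row from the failure row FA[pi[i-1]] via a char-to-column dict, instead of A's incremental row-copy construction with a running failure-state variable and repeated alphabet.index scans.
import Mathlib
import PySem

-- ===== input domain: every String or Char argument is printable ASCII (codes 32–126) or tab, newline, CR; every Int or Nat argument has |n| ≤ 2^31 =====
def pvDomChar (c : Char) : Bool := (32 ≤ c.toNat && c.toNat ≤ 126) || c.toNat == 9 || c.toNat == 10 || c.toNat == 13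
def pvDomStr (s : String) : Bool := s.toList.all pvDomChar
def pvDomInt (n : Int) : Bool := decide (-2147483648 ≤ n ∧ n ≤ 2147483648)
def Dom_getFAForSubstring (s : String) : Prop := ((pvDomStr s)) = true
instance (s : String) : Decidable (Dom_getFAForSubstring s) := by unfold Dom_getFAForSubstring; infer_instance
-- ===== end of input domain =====

-- B replaces A's incremental row-copy/running-length construction by a separate KMP
-- prefix-function pass plus failure-link row inheritance (objective: alternative decomposition).

-- ===== PORT A =====
def pvGetAlphabet (cs : List Char) : List Char :=
  cs.foldl (fun alphabet c => if c ∈ alphabet then alphabet else alphabet ++ [c]) []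

def getFAForSubstring (s : String) : List (List Int) :=
  let cs := s.toList
  let alphabet := pvGetAlphabet cs
  let FA0 : List (List Int) :=
    (List.range cs.length).map (fun _ => (List.range alphabet.length).map (fun _ => (0 : Int)))
  -- FA[0][0] = 1  (IndexError when s = "": excluded by Pre_)
  let FA1 := PySem.List.pySetD FA0 0 (PySem.List.pySetD (PySem.List.pyGetD FA0 0 []) 0 1)
  let res := (PySem.List.pyRange 1 (cs.length : Int) 1).foldl
    (fun (st : List (List Int) × Int) i =>
      let FA := st.1
      let length := st.2
      let ci : Int := ((PySem.List.index? alphabet (PySem.List.pyGetD cs i ' ')).getD 0 : Nat)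
      let FA := PySem.List.pySetD FA i (PySem.List.pyGetD FA length [])  -- FA[i] = FA[length].copy()
      let FA := PySem.List.pySetD FA i
        (PySem.List.pySetD (PySem.List.pyGetD FA i []) ci (i + 1))       -- FA[i][alphabet.index(s[i])] = i+1
      (FA, PySem.List.pyGetD (PySem.List.pyGetD FA length []) ci 0))     -- length = FA[length][alphabet.index(s[i])]
    (FA1, 0)
  res.1

-- ===== PORT B =====
-- the 'while k > 0 and s[k] != s[i]' loop; fuel only makes it total (each step strictly decreases k)
def pvBWhile (cs : List Char) (pi : List Int) (c : Char) : Nat → Int → Int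
  | 0, k => k
  | fuel + 1, k =>
    if 0 < k ∧ PySem.List.pyGetD cs k ' ' ≠ c then
      pvBWhile cs pi c fuel (PySem.List.pyGetD pi (k - 1) 0)
    else k

def getFAForSubstring_alt (s : String) : List (List Int) :=
  let cs := s.toList
  let alphabet := PySem.List.dedup cs                                    -- list(dict.fromkeys(s))
  let col := (PySem.List.enumerate alphabet 0).foldl
      (fun d p => PySem.Dict.insert d p.2 p.1) PySem.Dict.empty          -- {c: j for j, c in enumerate(alphabet)}
  let n : Int := cs.length
  let m : Int := alphabet.length
  let pi : List Int := (PySem.List.pyRange 1 n 1).foldl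
    (fun pi i =>
      let si := PySem.List.pyGetD cs i ' '
      let k := pvBWhile cs pi si i.toNat (PySem.List.pyGetD pi (i - 1) 0)
      PySem.List.pySetD pi i (if PySem.List.pyGetD cs k ' ' = si then k + 1 else 0))
    (List.replicate cs.length (0 : Int))
  let FA0 : List (List Int) :=
    (List.range cs.length).map (fun _ => List.replicate alphabet.length (0 : Int))
  let FA1 := PySem.List.pySetD FA0 0 (PySem.List.pySetD (PySem.List.pyGetD FA0 0 []) 0 1)  -- FA[0][0] = 1
  (PySem.List.pyRange 1 n 1).foldl
    (fun FA i =>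
      let fail := PySem.List.pyGetD FA (PySem.List.pyGetD pi (i - 1) 0) []   -- fail = FA[pi[i-1]]
      let ci := PySem.Dict.getD col (PySem.List.pyGetD cs i ' ') 0           -- ci = col[s[i]]
      PySem.List.pySetD FA i
        ((PySem.List.pyRange 0 m 1).map
          (fun j => if j = ci then i + 1 else PySem.List.pyGetD fail j 0)))  -- comprehension row
    FA1

-- ===== PRECONDITION & SPEC =====
-- Pre_ excludes only the empty string, on which Python A raises IndexError at FA[0][0] = 1.
def Pre_getFAForSubstring (s : String) : Prop := s ≠ ""
instance (s : String) : Decidable (Pre_getFAForSubstring s) := by unfold Pre_getFAForSubstring; infer_instance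
def pvWitness_getFAForSubstring : String := "abacab"

def Spec_getFAForSubstring (s : String) (out : List (List Int)) : Prop := out = getFAForSubstring_alt s
instance (s : String) (out : List (List Int)) : Decidable (Spec_getFAForSubstring s out) := by unfold Spec_getFAForSubstring; infer_instance

-- ===== CLAIM (what is proved, stated in full; the proofs are below) =====
def Claim_equal_getFAForSubstring : Prop := ∀ (s : String), Dom_getFAForSubstring s → Pre_getFAForSubstring s → Spec_getFAForSubstring s (getFAForSubstring s)

-- ===== LEMMAS AND PROOFS =====

-- generic: a foldl over range(1, t+1) as primitive recursion
def pvIterUp {α : Type} (f : α → Int → α) (init : α) : Nat → α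
  | 0 => init
  | t + 1 => f (pvIterUp f init t) ((t : Int) + 1)

theorem pvIterUp_eq {α : Type} (f : α → Int → α) (init : α) (t : Nat) :
    (PySem.List.pyRange 1 ((t : Int) + 1) 1).foldl f init = pvIterUp f init t := by
  induction t with
  | zero => simp [PySem.List.pyRange_one_eq_nil, pvIterUp]
  | succ t ih =>
      rw [show ((t + 1 : Nat) : Int) + 1 = (((t : Int) + 1) + 1) by push_cast; ring,
        PySem.List.pyRange_one_succ_right (by omega), List.foldl_append]
      simp [pvIterUp, ih]

-- named step functions (syntactically the ports' fold bodies)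
def pvAStep (cs alphabet : List Char) (st : List (List Int) × Int) (i : Int) :
    List (List Int) × Int :=
  let FA := st.1
  let length := st.2
  let ci : Int := ((PySem.List.index? alphabet (PySem.List.pyGetD cs i ' ')).getD 0 : Nat)
  let FA := PySem.List.pySetD FA i (PySem.List.pyGetD FA length [])
  let FA := PySem.List.pySetD FA i
    (PySem.List.pySetD (PySem.List.pyGetD FA i []) ci (i + 1))
  (FA, PySem.List.pyGetD (PySem.List.pyGetD FA length []) ci 0)

def pvPiStep (cs : List Char) (pi : List Int) (i : Int) : List Int :=
  let si := PySem.List.pyGetD cs i ' '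
  let k := pvBWhile cs pi si i.toNat (PySem.List.pyGetD pi (i - 1) 0)
  PySem.List.pySetD pi i (if PySem.List.pyGetD cs k ' ' = si then k + 1 else 0)

def pvTbStep (cs : List Char) (col : PySem.Dict Char Int) (pi : List Int) (m : Int)
    (FA : List (List Int)) (i : Int) : List (List Int) :=
  let fail := PySem.List.pyGetD FA (PySem.List.pyGetD pi (i - 1) 0) []
  let ci := PySem.Dict.getD col (PySem.List.pyGetD cs i ' ') 0
  PySem.List.pySetD FA i
    ((PySem.List.pyRange 0 m 1).map
      (fun j => if j = ci then i + 1 else PySem.List.pyGetD fail j 0))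

def pvPiN (cs : List Char) (t : Nat) : List Int :=
  pvIterUp (pvPiStep cs) (List.replicate cs.length (0 : Int)) t

def pvPI (cs : List Char) : List Int := pvPiN cs (cs.length - 1)

def pvCol (cs : List Char) : PySem.Dict Char Int :=
  (PySem.List.enumerate (PySem.List.dedup cs) 0).foldl
    (fun d p => PySem.Dict.insert d p.2 p.1) PySem.Dict.empty

def pvInitA (cs : List Char) : List (List Int) :=
  let FA0 := (List.range cs.length).map
    (fun _ => (List.range (pvGetAlphabet cs).length).map (fun _ => (0 : Int)))
  PySem.List.pySetD FA0 0 (PySem.List.pySetD (PySem.List.pyGetD FA0 0 []) 0 1)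

def pvInitB (cs : List Char) : List (List Int) :=
  let FA0 := (List.range cs.length).map
    (fun _ => List.replicate (PySem.List.dedup cs).length (0 : Int))
  PySem.List.pySetD FA0 0 (PySem.List.pySetD (PySem.List.pyGetD FA0 0 []) 0 1)

def pvTbN (cs : List Char) (t : Nat) : List (List Int) :=
  pvIterUp (pvTbStep cs (pvCol cs) (pvPI cs) ((PySem.List.dedup cs).length : Int)) (pvInitB cs) t

def pvAN (cs : List Char) (t : Nat) : List (List Int) × Int :=
  pvIterUp (pvAStep cs (pvGetAlphabet cs)) (pvInitA cs, 0) t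

-- chain and hit: the while-loop and the new pi value, with canonical fuel
def pvChain (cs : List Char) (pi : List Int) (c : Char) (k : Int) : Int :=
  pvBWhile cs pi c k.toNat k

def pvHit (cs : List Char) (pi : List Int) (c : Char) (k : Int) : Int :=
  if PySem.List.pyGetD cs (pvChain cs pi c k) ' ' = c then pvChain cs pi c k + 1 else 0

-- connections of the ports to the named recursions
theorem pvA_conn (s : String) (h : s.toList ≠ []) :
    getFAForSubstring s = (pvAN s.toList (s.toList.length - 1)).1 := by
  have hlen : 0 < s.toList.length := List.length_pos_iff.mpr h
  unfold getFAForSubstring pvAN pvInitA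
  dsimp only
  rw [show ((s.toList.length : Nat) : Int) = ((s.toList.length - 1 : Nat) : Int) + 1 by omega,
    pvIterUp_eq]
  rfl

theorem pvB_conn (s : String) (h : s.toList ≠ []) :
    getFAForSubstring_alt s = pvTbN s.toList (s.toList.length - 1) := by
  have hlen : 0 < s.toList.length := List.length_pos_iff.mpr h
  unfold getFAForSubstring_alt pvTbN pvPI pvPiN pvCol pvInitB
  dsimp only
  rw [show ((s.toList.length : Nat) : Int) = ((s.toList.length - 1 : Nat) : Int) + 1 by omega,
    pvIterUp_eq, pvIterUp_eq]
  rfl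

-- alphabet facts
theorem pvAlpha_eq (cs : List Char) : pvGetAlphabet cs = PySem.List.dedup cs := by
  simp only [PySem.List.dedup_eq_ofList, PySem.Set.ofList_eq_foldl, pvGetAlphabet]
  congr 1
  funext s c
  simp [PySem.Set.add, PySem.Set.contains]
theorem pvPrefix_foldl_add (l : List Char) : ∀ s : List Char, s <+: l.foldl PySem.Set.add s := by
  induction l with
  | nil => intro s; simp
  | cons c t ih =>
      intro s
      simp only [List.foldl_cons]
      refine List.IsPrefix.trans ?_ (ih _)
      unfold PySem.Set.add
      split <;> simp

theorem pvAlpha_head (c : Char) (cs : List Char) :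
    ∃ t, PySem.List.dedup (c :: cs) = c :: t := by
  obtain ⟨t, ht⟩ := pvPrefix_foldl_add cs [c]
  refine ⟨t, ?_⟩
  simp only [PySem.List.dedup_eq_ofList, PySem.Set.ofList_eq_foldl, List.foldl_cons]
  show List.foldl PySem.Set.add (PySem.Set.add [] c) cs = c :: t
  rw [show PySem.Set.add [] c = [c] from rfl, ← ht]
  rfl
theorem pvIdx_inj (cs : List Char) (c c' : Char) (h : c ∈ PySem.List.dedup cs)
    (h' : c' ∈ PySem.List.dedup cs)
    (he : (PySem.List.dedup cs).idxOf c = (PySem.List.dedup cs).idxOf c') : c = c' := by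
  have h1 := List.getElem_idxOf (List.idxOf_lt_length_of_mem h)
  have h2 := List.getElem_idxOf (List.idxOf_lt_length_of_mem h')
  rw [← h1]
  simp only [he]
  exact h2
theorem pvCiA (cs : List Char) (c : Char) (h : c ∈ cs) :
    ((PySem.List.index? (pvGetAlphabet cs) c).getD 0 : Int)
      = ((PySem.List.dedup cs).idxOf c : Int) := by
  have hmem : c ∈ PySem.List.dedup cs := (PySem.List.mem_dedup _ _).mpr h
  have hne : List.idxOf? c (PySem.List.dedup cs) ≠ none := by
    simpa [List.idxOf?_eq_none_iff, PySem.List.mem_dedup] using h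
  obtain ⟨x, hx⟩ := Option.ne_none_iff_exists'.mp hne
  rw [pvAlpha_eq, PySem.List.index?_eq_idxOf?, hx, List.idxOf_eq_getD_idxOf?, hx]
  rfl
theorem pvCiB (cs : List Char) (c : Char) (h : c ∈ cs) :
    PySem.Dict.getD (pvCol cs) c 0 = ((PySem.List.dedup cs).idxOf c : Int) := by
  have hmem : c ∈ PySem.List.dedup cs := (PySem.List.mem_dedup _ _).mpr h
  have hnd := PySem.List.nodup_dedup cs
  have hitems := PySem.Dict.items_foldl_insert_fresh
    (l := PySem.List.enumerate (PySem.List.dedup cs) 0)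
    (k := fun p => p.2) (v := fun p => p.1) (d := PySem.Dict.empty)
    (by intro a _; simp [PySem.Dict.contains_empty])
    (by rw [PySem.List.map_snd_enumerate]; exact hnd)
  beta_reduce at hitems
  apply PySem.Dict.getD_of_mem_items
  · unfold pvCol
    rw [hitems]
    simp only [show PySem.Dict.empty.items = ([] : List (Char × Int)) from rfl,
      List.nil_append, List.mem_map]
    refine ⟨(((PySem.List.dedup cs).idxOf c : Int), c), ?_, rfl⟩
    rw [PySem.List.mem_enumerate_iff]
    exact ⟨(PySem.List.dedup cs).idxOf c, List.idxOf_lt_length_of_mem hmem,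
      by simp [List.getElem_idxOf]⟩
  · unfold pvCol
    exact PySem.Dict.nodup_keys_foldl_insert_key _ (fun (p : Int × Char) => p.2)
      (fun d p => p.1) _ (by simp [PySem.Dict.keys_empty])

-- bwhile facts

theorem pvGetD_nonneg {α : Type} [Inhabited α] (xs : List α) (i : Int) (d : α) (h : 0 ≤ i) :
    PySem.List.pyGetD xs i d = xs.getD i.toNat d := by
  have h2 : i = ((i.toNat : Nat) : Int) := by omega
  rw [h2, PySem.List.pyGetD_natCast, Int.toNat_natCast]

theorem pvBWhile_succ (cs : List Char) (pi : List Int) (c : Char) (f : Nat) (k : Int) :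
    pvBWhile cs pi c (f + 1) k
      = if 0 < k ∧ PySem.List.pyGetD cs k ' ' ≠ c then
          pvBWhile cs pi c f (PySem.List.pyGetD pi (k - 1) 0)
        else k := rfl

theorem pvBWhile_zero (cs : List Char) (pi : List Int) (c : Char) (f : Nat) :
    pvBWhile cs pi c f 0 = 0 := by
  cases f <;> simp [pvBWhile]

theorem pvBWhile_bounds (cs : List Char) (pi : List Int) (c : Char)
    (hb : ∀ j : Nat, 0 ≤ pi.getD j 0 ∧ pi.getD j 0 ≤ j)
    (fuel : Nat) (k : Int) (hk : 0 ≤ k) :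
    0 ≤ pvBWhile cs pi c fuel k ∧ pvBWhile cs pi c fuel k ≤ k := by
  induction fuel generalizing k with
  | zero => exact ⟨hk, le_refl _⟩
  | succ f ih =>
      by_cases hcond : 0 < k ∧ PySem.List.pyGetD cs k ' ' ≠ c
      · have hk' : PySem.List.pyGetD pi (k - 1) 0 = pi.getD (k - 1).toNat 0 :=
          pvGetD_nonneg _ _ _ (by omega)
        have hb' := hb (k - 1).toNat
        have h1 : 0 ≤ PySem.List.pyGetD pi (k - 1) 0 := by rw [hk']; exact hb'.1
        have h2 : PySem.List.pyGetD pi (k - 1) 0 ≤ k - 1 := by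
          rw [hk']; refine le_trans hb'.2 ?_; omega
        have := ih (PySem.List.pyGetD pi (k - 1) 0) h1
        simp only [pvBWhile, if_pos hcond]
        exact ⟨this.1, by omega⟩
      · simp only [pvBWhile, if_neg hcond]
        exact ⟨hk, le_refl _⟩

theorem pvBWhile_fuel (cs : List Char) (pi : List Int) (c : Char)
    (hb : ∀ j : Nat, 0 ≤ pi.getD j 0 ∧ pi.getD j 0 ≤ j)
    (f1 f2 : Nat) (k : Int) (hk : 0 ≤ k) (h1 : k.toNat ≤ f1) (h2 : k.toNat ≤ f2) :
    pvBWhile cs pi c f1 k = pvBWhile cs pi c f2 k := by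
  suffices H : ∀ N : Nat, ∀ k : Int, 0 ≤ k → k.toNat ≤ N → ∀ f1 f2 : Nat,
      k.toNat ≤ f1 → k.toNat ≤ f2 → pvBWhile cs pi c f1 k = pvBWhile cs pi c f2 k from
    H k.toNat k hk (le_refl _) f1 f2 h1 h2
  intro N
  induction N with
  | zero =>
      intro k hk hN f1 f2 _ _
      rw [show k = 0 by omega, pvBWhile_zero, pvBWhile_zero]
  | succ N ih =>
      intro k hk hN f1 f2 hf1 hf2
      by_cases hcond : 0 < k ∧ PySem.List.pyGetD cs k ' ' ≠ c
      · have hkn : 1 ≤ k.toNat := by omega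
        obtain ⟨f1', rfl⟩ : ∃ f1', f1 = f1' + 1 := ⟨f1 - 1, by omega⟩
        obtain ⟨f2', rfl⟩ : ∃ f2', f2 = f2' + 1 := ⟨f2 - 1, by omega⟩
        simp only [pvBWhile, if_pos hcond]
        have hk' : PySem.List.pyGetD pi (k - 1) 0 = pi.getD (k - 1).toNat 0 :=
          pvGetD_nonneg _ _ _ (by omega)
        have hb' := hb (k - 1).toNat
        refine ih _ (by rw [hk']; exact hb'.1) (by omega) _ _ (by omega) (by omega)
      · cases f1 <;> cases f2 <;> simp [pvBWhile, hcond]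

theorem pvBWhile_congr (cs : List Char) (pi1 pi2 : List Int) (c : Char)
    (fuel : Nat) (k : Int) (hk : 0 ≤ k)
    (hb : ∀ j : Nat, 0 ≤ pi1.getD j 0 ∧ pi1.getD j 0 ≤ j)
    (h : ∀ j : Nat, j < k.toNat → pi1.getD j 0 = pi2.getD j 0) :
    pvBWhile cs pi1 c fuel k = pvBWhile cs pi2 c fuel k := by
  induction fuel generalizing k with
  | zero => rfl
  | succ f ih =>
      by_cases hcond : 0 < k ∧ PySem.List.pyGetD cs k ' ' ≠ c
      · simp only [pvBWhile, if_pos hcond]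
        have e1 : PySem.List.pyGetD pi1 (k - 1) 0 = pi1.getD (k - 1).toNat 0 :=
          pvGetD_nonneg _ _ _ (by omega)
        have e2 : PySem.List.pyGetD pi2 (k - 1) 0 = pi2.getD (k - 1).toNat 0 :=
          pvGetD_nonneg _ _ _ (by omega)
        have heq : PySem.List.pyGetD pi1 (k - 1) 0 = PySem.List.pyGetD pi2 (k - 1) 0 := by
          rw [e1, e2, h _ (by omega)]
        rw [← heq]
        have hb' := hb (k - 1).toNat
        refine ih _ (by rw [e1]; exact hb'.1) ?_
        intro j hj
        refine h j ?_
        have : pi1.getD (k - 1).toNat 0 ≤ ((k - 1).toNat : Int) := by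
          exact_mod_cast hb'.2
        rw [e1] at hj
        omega
      · simp [pvBWhile, hcond]

-- pi facts
theorem pvSet_getD {α : Type} [Inhabited α] (xs : List α) (i j : Nat) (v d : α) :
    (xs.set i v).getD j d = if j = i ∧ i < xs.length then v else xs.getD j d := by
  rw [List.getD, List.getElem?_set]
  by_cases h : i = j
  · subst h
    by_cases h2 : i < xs.length
    · simp [h2]
    · rw [if_pos rfl, if_neg h2, if_neg (by tauto), Option.getD_none, List.getD,
        List.getElem?_eq_none (by omega), Option.getD_none]
  · rw [if_neg h, if_neg (by tauto), List.getD]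

theorem pvPiN_succ (cs : List Char) (t : Nat) :
    pvPiN cs (t + 1) = pvPiStep cs (pvPiN cs t) ((t : Int) + 1) := rfl

theorem pvPiN_succ' (cs : List Char) (t : Nat) :
    pvPiN cs (t + 1)
      = (pvPiN cs t).set (t + 1)
          (if PySem.List.pyGetD cs
              (pvBWhile cs (pvPiN cs t) (cs.getD (t + 1) ' ') (t + 1)
                ((pvPiN cs t).getD t 0)) ' ' = cs.getD (t + 1) ' '
            then pvBWhile cs (pvPiN cs t) (cs.getD (t + 1) ' ') (t + 1)
                ((pvPiN cs t).getD t 0) + 1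
            else 0) := by
  rw [pvPiN_succ]
  unfold pvPiStep
  have e2 : PySem.List.pyGetD cs ((t : Int) + 1) ' ' = cs.getD (t + 1) ' ' := by
    rw [pvGetD_nonneg _ _ _ (by omega)]
    congr 1 <;> omega
  have e3 : PySem.List.pyGetD (pvPiN cs t) ((t : Int) + 1 - 1) 0 = (pvPiN cs t).getD t 0 := by
    rw [pvGetD_nonneg _ _ _ (by omega)]
    congr 1 <;> omega
  have e4 : ((t : Int) + 1).toNat = t + 1 := by omega
  have e1 : ((t : Int) + 1) = ((t + 1 : Nat) : Int) := by push_cast; ring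
  rw [e2, e3, e4, e1, PySem.List.pySetD_natCast]

theorem pvPiN_len (cs : List Char) (t : Nat) : (pvPiN cs t).length = cs.length := by
  induction t with
  | zero => simp [pvPiN, pvIterUp]
  | succ t ih => rw [pvPiN_succ']; simpa using ih

theorem pvPiN_bounds (cs : List Char) (t : Nat) :
    ∀ j : Nat, 0 ≤ (pvPiN cs t).getD j 0 ∧ (pvPiN cs t).getD j 0 ≤ j := by
  induction t with
  | zero =>
      intro j
      unfold pvPiN pvIterUp
      rw [List.getD, List.getElem?_replicate]
      split <;> simp
  | succ t ih =>
      intro j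
      rw [pvPiN_succ', pvSet_getD]
      split
      · next hj =>
          have hb := pvBWhile_bounds cs (pvPiN cs t) (cs.getD (t + 1) ' ') ih (t + 1)
            ((pvPiN cs t).getD t 0) (ih t).1
          have h2 := (ih t).2
          obtain ⟨rfl, -⟩ := hj
          split
          · constructor
            · have := hb.1; omega
            · have := hb.2; omega
          · omega
      · exact ih j

theorem pvPiN_stable (cs : List Char) (t t' : Nat) (h : t ≤ t') :
    ∀ j : Nat, j ≤ t → (pvPiN cs t').getD j 0 = (pvPiN cs t).getD j 0 := by
  induction t' with
  | zero => intro j hj; rw [show t = 0 by omega]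
  | succ t' ih =>
      intro j hj
      rcases Nat.lt_or_ge t (t' + 1) with hlt | hge
      · have ht : t ≤ t' := by omega
        rw [pvPiN_succ', pvSet_getD, if_neg (by rintro ⟨rfl, -⟩; omega)]
        exact ih ht j hj
      · rw [show t = t' + 1 by omega]

theorem pvPI_bounds (cs : List Char) :
    ∀ j : Nat, 0 ≤ (pvPI cs).getD j 0 ∧ (pvPI cs).getD j 0 ≤ j := pvPiN_bounds cs _

theorem pvPI_zero (cs : List Char) : (pvPI cs).getD 0 0 = 0 := by
  have := pvPI_bounds cs 0
  omega

theorem pvPI_rec (cs : List Char) (t : Nat) (h1 : 1 ≤ t) (h2 : t ≤ cs.length - 1) :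
    (pvPI cs).getD t 0
      = pvHit cs (pvPI cs) (cs.getD t ' ') ((pvPI cs).getD (t - 1) 0) := by
  obtain ⟨u, rfl⟩ : ∃ u, t = u + 1 := ⟨t - 1, by omega⟩
  have hn : u + 1 < cs.length := by omega
  have hstab := pvPiN_stable cs (u + 1) (cs.length - 1) (by omega) (u + 1) (le_refl _)
  show (pvPiN cs (cs.length - 1)).getD (u + 1) 0 = _
  rw [hstab, pvPiN_succ', pvSet_getD, if_pos ⟨rfl, by rw [pvPiN_len]; omega⟩]
  have hbu := pvPiN_bounds cs u
  have hk0nn : 0 ≤ (pvPiN cs u).getD u 0 := (hbu u).1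
  have hk0le : (pvPiN cs u).getD u 0 ≤ u := (hbu u).2
  have hPIu : (pvPI cs).getD u 0 = (pvPiN cs u).getD u 0 :=
    pvPiN_stable cs u (cs.length - 1) (by omega) u (le_refl _)
  have hchain : pvBWhile cs (pvPiN cs u) (cs.getD (u + 1) ' ') (u + 1) ((pvPiN cs u).getD u 0)
      = pvChain cs (pvPI cs) (cs.getD (u + 1) ' ') ((pvPiN cs u).getD u 0) := by
    rw [pvBWhile_congr cs (pvPiN cs u) (pvPI cs) (cs.getD (u + 1) ' ') (u + 1)
      ((pvPiN cs u).getD u 0) hk0nn hbu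
      (by
        intro j hj
        exact (pvPiN_stable cs u (cs.length - 1) (by omega) j (by omega)).symm)]
    unfold pvChain
    exact pvBWhile_fuel cs (pvPI cs) (cs.getD (u + 1) ' ') (pvPI_bounds cs) (u + 1)
      ((pvPiN cs u).getD u 0).toNat ((pvPiN cs u).getD u 0) hk0nn (by omega) (le_refl _)
  unfold pvHit
  rw [show u + 1 - 1 = u from rfl, hPIu, ← hchain]

-- table facts
theorem pvTbN_succ (cs : List Char) (t : Nat) :
    pvTbN cs (t + 1)
      = pvTbStep cs (pvCol cs) (pvPI cs) ((PySem.List.dedup cs).length : Int)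
          (pvTbN cs t) ((t : Int) + 1) := rfl

theorem pvTbN_succ' (cs : List Char) (t : Nat) :
    pvTbN cs (t + 1)
      = (pvTbN cs t).set (t + 1)
          ((PySem.List.pyRange 0 ((PySem.List.dedup cs).length : Int) 1).map
            (fun j => if j = PySem.Dict.getD (pvCol cs) (cs.getD (t + 1) ' ') 0
              then ((t : Int) + 1) + 1
              else PySem.List.pyGetD
                ((pvTbN cs t).getD ((pvPI cs).getD t 0).toNat []) j 0)) := by
  rw [pvTbN_succ]
  unfold pvTbStep
  have e2 : PySem.List.pyGetD cs ((t : Int) + 1) ' ' = cs.getD (t + 1) ' ' := by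
    rw [pvGetD_nonneg _ _ _ (by omega)]
    congr 1 <;> omega
  have e3 : PySem.List.pyGetD (pvPI cs) ((t : Int) + 1 - 1) 0 = (pvPI cs).getD t 0 := by
    rw [pvGetD_nonneg _ _ _ (by omega)]
    congr 1 <;> omega
  have e5 : PySem.List.pyGetD (pvTbN cs t) ((pvPI cs).getD t 0) []
      = (pvTbN cs t).getD ((pvPI cs).getD t 0).toNat [] :=
    pvGetD_nonneg _ _ _ (pvPI_bounds cs t).1
  have e1 : ((t : Int) + 1) = ((t + 1 : Nat) : Int) := by push_cast; ring
  rw [e2, e3, e5, e1, PySem.List.pySetD_natCast]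

theorem pvInitB_eq (cs : List Char) :
    pvInitB cs
      = ((List.range cs.length).map
          (fun _ => List.replicate (PySem.List.dedup cs).length (0 : Int))).set 0
          (PySem.List.pySetD
            (((List.range cs.length).map
              (fun _ => List.replicate (PySem.List.dedup cs).length (0 : Int))).getD 0 [])
            0 1) := by
  unfold pvInitB
  dsimp only
  rw [PySem.List.pySetD_of_nonneg _ _ (by omega), pvGetD_nonneg _ _ _ (by omega)]
  rfl

theorem pvInitB_row (cs : List Char) (r : Nat) (hr : r < cs.length) :
    (pvInitB cs).getD r []
      = if r = 0 then (List.replicate (PySem.List.dedup cs).length (0 : Int)).set 0 1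
        else List.replicate (PySem.List.dedup cs).length (0 : Int) := by
  have hrow : ∀ q : Nat, q < cs.length →
      (((List.range cs.length).map
        (fun _ => List.replicate (PySem.List.dedup cs).length (0 : Int))).getD q [])
      = List.replicate (PySem.List.dedup cs).length (0 : Int) := by
    intro q hq
    rw [List.getD, List.getElem?_map, List.getElem?_range hq]
    rfl
  rw [pvInitB_eq, pvSet_getD]
  by_cases h0 : r = 0
  · subst h0
    rw [if_pos ⟨rfl, by simpa using hr⟩, if_pos rfl, hrow 0 (by omega),
      PySem.List.pySetD_of_nonneg _ _ (by omega)]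
    rfl
  · rw [if_neg (by tauto), if_neg h0]
    exact hrow r hr

theorem pvTbN_len (cs : List Char) (t : Nat) : (pvTbN cs t).length = cs.length := by
  induction t with
  | zero =>
      show (pvInitB cs).length = _
      rw [pvInitB_eq]
      simp
  | succ t ih => rw [pvTbN_succ']; simpa using ih

theorem pvTbN_stable (cs : List Char) (t t' : Nat) (h : t ≤ t') (r : Nat) (hr : r ≤ t) :
    (pvTbN cs t').getD r [] = (pvTbN cs t).getD r [] := by
  induction t' with
  | zero => rw [show t = 0 by omega]
  | succ t' ih =>
      rcases Nat.lt_or_ge t (t' + 1) with hlt | hge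
      · have ht : t ≤ t' := by omega
        rw [pvTbN_succ', pvSet_getD, if_neg (by rintro ⟨rfl, -⟩; omega)]
        exact ih ht
      · rw [show t = t' + 1 by omega]

theorem pvTbN_rowlen (cs : List Char) (t : Nat) (r : Nat) (hr : r < cs.length) :
    ((pvTbN cs t).getD r []).length = (PySem.List.dedup cs).length := by
  induction t with
  | zero =>
      show ((pvInitB cs).getD r []).length = _
      rw [pvInitB_row cs r hr]
      split <;> simp
  | succ t ih =>
      rw [pvTbN_succ', pvSet_getD]
      split
      · simp [PySem.List.length_pyRange_one]
      · exact ih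

theorem pvTb_row0 (cs : List Char) (t : Nat) (h : cs ≠ []) :
    (pvTbN cs t).getD 0 []
      = (List.replicate (PySem.List.dedup cs).length (0 : Int)).set 0 1 := by
  rw [pvTbN_stable cs 0 t (by omega) 0 (le_refl _)]
  show (pvInitB cs).getD 0 [] = _
  rw [pvInitB_row cs 0 (by cases cs <;> simp_all), if_pos rfl]

theorem pvTb_rowrec (cs : List Char) (k : Nat) (h1 : 1 ≤ k) (h2 : k ≤ cs.length - 1) :
    (pvTbN cs (cs.length - 1)).getD k []
      = (PySem.List.pyRange 0 ((PySem.List.dedup cs).length : Int) 1).map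
          (fun j => if j = ((PySem.List.dedup cs).idxOf (cs.getD k ' ') : Int) then (k : Int) + 1
            else PySem.List.pyGetD
              ((pvTbN cs (cs.length - 1)).getD ((pvPI cs).getD (k - 1) 0).toNat []) j 0) := by
  obtain ⟨u, rfl⟩ : ∃ u, k = u + 1 := ⟨k - 1, by omega⟩
  have hn : u + 1 < cs.length := by omega
  rw [pvTbN_stable cs (u + 1) (cs.length - 1) (by omega) (u + 1) (le_refl _),
    pvTbN_succ', pvSet_getD, if_pos ⟨rfl, by rw [pvTbN_len]; omega⟩]
  have hciB := pvCiB cs (cs.getD (u + 1) ' ')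
    (by rw [List.getD, List.getElem?_eq_getElem hn]; exact List.getElem_mem hn)
  have hPIb := pvPI_bounds cs u
  have hrowstab : (pvTbN cs u).getD ((pvPI cs).getD u 0).toNat []
      = (pvTbN cs (cs.length - 1)).getD ((pvPI cs).getD u 0).toNat [] := by
    rw [pvTbN_stable cs u (cs.length - 1) (by omega) ((pvPI cs).getD u 0).toNat (by omega)]
  rw [hciB, hrowstab, show u + 1 - 1 = u from rfl,
    show ((u : Int) + 1) + 1 = ((u + 1 : Nat) : Int) + 1 by push_cast; ring]

-- THE key lemma: a final-table entry is the while-chain value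
theorem pvE (cs : List Char) (h : cs ≠ []) (k : Nat) (hk : k ≤ cs.length - 1)
    (c : Char) (hc : c ∈ cs) :
    PySem.List.pyGetD ((pvTbN cs (cs.length - 1)).getD k [])
        ((PySem.List.dedup cs).idxOf c : Int) 0
      = pvHit cs (pvPI cs) c (k : Int) := by
  revert hk c
  induction k using Nat.strong_induction_on with
  | _ k ih =>
  intro hk c hc
  have hcd : c ∈ PySem.List.dedup cs := (PySem.List.mem_dedup _ _).mpr hc
  have hidx : (PySem.List.dedup cs).idxOf c < (PySem.List.dedup cs).length :=
    List.idxOf_lt_length_of_mem hcd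
  cases k with
  | zero =>
      obtain ⟨c0, cr, rfl⟩ : ∃ c0 cr, cs = c0 :: cr := by
        cases cs with
        | nil => exact absurd rfl h
        | cons c0 cr => exact ⟨c0, cr, rfl⟩
      obtain ⟨tl, htl⟩ := pvAlpha_head c0 cr
      rw [pvTb_row0 _ _ h, PySem.List.pyGetD_natCast, pvSet_getD]
      have hchain0 : pvChain (c0 :: cr) (pvPI (c0 :: cr)) c ((0 : Nat) : Int) = 0 := rfl
      unfold pvHit
      rw [hchain0, PySem.List.pyGetD_zero_cons]
      by_cases hcc : c0 = c
      · subst hcc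
        rw [if_pos rfl, if_pos ⟨by rw [htl]; exact List.idxOf_cons_self, by rw [htl]; simp⟩]
        norm_num
      · rw [if_neg hcc, if_neg ?hne]
        · rw [List.getD, List.getElem?_replicate]
          split <;> rfl
        case hne =>
          rintro ⟨h0, -⟩
          apply hcc
          rw [htl] at h0 hcd
          rcases List.mem_cons.mp hcd with rfl | hmem
          · rfl
          · exfalso
            rw [List.idxOf_cons_ne _ (fun heq => hcc heq)] at h0
            omega
  | succ u =>
      have hu1 : 1 ≤ u + 1 := by omega
      have hckmem : cs.getD (u + 1) ' ' ∈ cs := by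
        rw [List.getD, List.getElem?_eq_getElem (by omega)]
        exact List.getElem_mem _
      have hckd : cs.getD (u + 1) ' ' ∈ PySem.List.dedup cs :=
        (PySem.List.mem_dedup _ _).mpr hckmem
      have hPIb := pvPI_bounds cs u
      have hcast : PySem.List.pyGetD cs ((u + 1 : Nat) : Int) ' ' = cs.getD (u + 1) ' ' := by
        rw [pvGetD_nonneg _ _ _ (by omega), Int.toNat_natCast]
      have hf : ((u + 1 : Nat) : Int).toNat = u + 1 := by omega
      rw [pvTb_rowrec cs (u + 1) hu1 hk, PySem.List.pyGetD_map_pyRange _ _ _ _ hidx,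
        show u + 1 - 1 = u from rfl]
      by_cases hcc : c = cs.getD (u + 1) ' '
      · rw [if_pos (by rw [hcc])]
        have hchain : pvChain cs (pvPI cs) c ((u + 1 : Nat) : Int) = ((u + 1 : Nat) : Int) := by
          unfold pvChain
          rw [hf, pvBWhile_succ,
            if_neg (by rintro ⟨-, hne⟩; exact hne (by rw [hcast, ← hcc]))]
        unfold pvHit
        rw [hchain, if_pos (by rw [hcast, ← hcc])]
      · rw [if_neg (by
            intro heq
            exact hcc (pvIdx_inj cs c _ hcd hckd (by exact_mod_cast heq))),
          ih ((pvPI cs).getD u 0).toNat (by omega) (by omega) c hc,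
          show ((((pvPI cs).getD u 0).toNat : Nat) : Int) = (pvPI cs).getD u 0 by omega]
        have hpi1 : PySem.List.pyGetD (pvPI cs) (((u + 1 : Nat) : Int) - 1) 0
            = (pvPI cs).getD u 0 := by
          rw [pvGetD_nonneg _ _ _ (by omega)]
          congr 1 <;> omega
        have hchain : pvChain cs (pvPI cs) c ((u + 1 : Nat) : Int)
            = pvChain cs (pvPI cs) c ((pvPI cs).getD u 0) := by
          unfold pvChain
          rw [hf, pvBWhile_succ,
            if_pos ⟨by omega, by rw [hcast]; exact fun he => hcc he.symm⟩, hpi1]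
          exact pvBWhile_fuel cs (pvPI cs) c (pvPI_bounds cs) u _ _ hPIb.1 (by omega) (le_refl _)
        unfold pvHit
        rw [hchain]

-- row shapes: the comprehension row IS the copied-and-updated row
theorem pvRowMap (row : List Int) (m ci : Nat) (v : Int) (hlen : row.length = m)
    (hci : ci < m) :
    (PySem.List.pyRange 0 (m : Int) 1).map
        (fun j => if j = (ci : Int) then v else PySem.List.pyGetD row j 0)
      = row.set ci v := by
  apply List.ext_getElem
  · rw [List.length_map, PySem.List.length_pyRange_one, List.length_set, hlen]
    omega
  · intro i h1 h2
    rw [List.getElem_map, PySem.List.getElem_pyRange_one, List.getElem_set]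
    have hi : i < row.length := by rwa [List.length_set] at h2
    simp only [zero_add]
    by_cases hic : i = ci
    · subst hic
      rw [if_pos rfl, if_pos rfl]
    · rw [if_neg (by push_cast; omega), if_neg (fun he => hic he.symm),
        PySem.List.pyGetD_natCast, List.getD_eq_getElem _ _ hi]

theorem pvInitA_eq (cs : List Char) : pvInitA cs = pvInitB cs := by
  unfold pvInitA pvInitB
  have hrow : (List.range (pvGetAlphabet cs).length).map (fun _ => (0 : Int))
      = List.replicate (PySem.List.dedup cs).length (0 : Int) := by
    rw [List.map_const', List.length_range, pvAlpha_eq]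
  rw [hrow]

-- the A-side invariant
theorem pvMain (cs : List Char) (h : cs ≠ []) (t : Nat) (ht : t ≤ cs.length - 1) :
    pvAN cs t = (pvTbN cs t, (pvPI cs).getD t 0) := by
  induction t with
  | zero =>
      show (pvInitA cs, 0) = (pvTbN cs 0, (pvPI cs).getD 0 0)
      rw [pvPI_zero, pvInitA_eq]
      rfl
  | succ t ih =>
      have hn : t + 1 < cs.length := by omega
      have ihe := ih (by omega)
      rw [show pvAN cs (t + 1)
          = pvAStep cs (pvGetAlphabet cs) (pvAN cs t) ((t : Int) + 1) from rfl, ihe]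
      unfold pvAStep
      dsimp only
      -- notation
      have hck : PySem.List.pyGetD cs ((t : Int) + 1) ' ' = cs.getD (t + 1) ' ' := by
        rw [pvGetD_nonneg _ _ _ (by omega)]
        congr 1 <;> omega
      have hckmem : cs.getD (t + 1) ' ' ∈ cs := by
        rw [List.getD, List.getElem?_eq_getElem hn]
        exact List.getElem_mem _
      have hci : ((PySem.List.index? (pvGetAlphabet cs) (PySem.List.pyGetD cs ((t : Int) + 1) ' ')).getD 0 : Int)
          = ((PySem.List.dedup cs).idxOf (cs.getD (t + 1) ' ') : Int) := by
        rw [hck]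
        exact pvCiA cs _ hckmem
      have hidx : (PySem.List.dedup cs).idxOf (cs.getD (t + 1) ' ')
          < (PySem.List.dedup cs).length :=
        List.idxOf_lt_length_of_mem ((PySem.List.mem_dedup _ _).mpr hckmem)
      have hPIb := pvPI_bounds cs t
      have hk0nn : 0 ≤ (pvPI cs).getD t 0 := hPIb.1
      have hk0le : ((pvPI cs).getD t 0).toNat ≤ t := by omega
      have hlenT := pvTbN_len cs t
      -- the copied row
      have hrowF : PySem.List.pyGetD (pvTbN cs t) ((pvPI cs).getD t 0) []
          = (pvTbN cs t).getD ((pvPI cs).getD t 0).toNat [] :=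
        pvGetD_nonneg _ _ _ hk0nn
      have hset : PySem.List.pySetD (pvTbN cs t) ((t : Int) + 1)
            (PySem.List.pyGetD (pvTbN cs t) ((pvPI cs).getD t 0) [])
          = (pvTbN cs t).set (t + 1)
            ((pvTbN cs t).getD ((pvPI cs).getD t 0).toNat []) := by
        rw [hrowF, PySem.List.pySetD_of_nonneg _ _ (by omega),
          show ((t : Int) + 1).toNat = t + 1 by omega]
      rw [hset, hci]
      set rowF := (pvTbN cs t).getD ((pvPI cs).getD t 0).toNat [] with hrowFdef
      have hget2 : PySem.List.pyGetD ((pvTbN cs t).set (t + 1) rowF) ((t : Int) + 1) []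
          = rowF := by
        rw [pvGetD_nonneg _ _ _ (by omega),
          show ((t : Int) + 1).toNat = t + 1 by omega, pvSet_getD,
          if_pos ⟨rfl, by omega⟩]
      rw [hget2]
      have hsetrow : PySem.List.pySetD rowF
            (((PySem.List.dedup cs).idxOf (cs.getD (t + 1) ' ') : Nat) : Int) ((t : Int) + 1 + 1)
          = rowF.set ((PySem.List.dedup cs).idxOf (cs.getD (t + 1) ' ')) ((t : Int) + 1 + 1) := by
        rw [PySem.List.pySetD_of_nonneg _ _ (by omega), Int.toNat_natCast]
      rw [hsetrow]
      have hset2 : PySem.List.pySetD ((pvTbN cs t).set (t + 1) rowF) ((t : Int) + 1)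
            (rowF.set ((PySem.List.dedup cs).idxOf (cs.getD (t + 1) ' ')) ((t : Int) + 1 + 1))
          = (pvTbN cs t).set (t + 1)
            (rowF.set ((PySem.List.dedup cs).idxOf (cs.getD (t + 1) ' ')) ((t : Int) + 1 + 1)) := by
        rw [PySem.List.pySetD_of_nonneg _ _ (by omega),
          show ((t : Int) + 1).toNat = t + 1 by omega, List.set_set]
      rw [hset2]
      -- the fail row is final and in range
      have hrowstab : rowF = (pvTbN cs (cs.length - 1)).getD ((pvPI cs).getD t 0).toNat [] := by
        rw [hrowFdef, pvTbN_stable cs t (cs.length - 1) (by omega) _ hk0le]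
      have hrowlen : rowF.length = (PySem.List.dedup cs).length :=
        pvTbN_rowlen cs t _ (by omega)
      -- second read of FA[length] after the writes at index t+1 ≠ length
      have hget3 : PySem.List.pyGetD
            ((pvTbN cs t).set (t + 1)
              (rowF.set ((PySem.List.dedup cs).idxOf (cs.getD (t + 1) ' ')) ((t : Int) + 1 + 1)))
            ((pvPI cs).getD t 0) []
          = rowF := by
        rw [pvGetD_nonneg _ _ _ hk0nn, pvSet_getD, if_neg (by rintro ⟨he, -⟩; omega)]
      rw [hget3]
      -- the length update equals pi[t+1]
      have hlen' : PySem.List.pyGetD rowF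
            (((PySem.List.dedup cs).idxOf (cs.getD (t + 1) ' ') : Nat) : Int) 0
          = (pvPI cs).getD (t + 1) 0 := by
        rw [hrowstab, pvE cs h ((pvPI cs).getD t 0).toNat (by omega) _ hckmem,
          pvPI_rec cs (t + 1) (by omega) (by omega),
          show t + 1 - 1 = t from rfl,
          show ((((pvPI cs).getD t 0).toNat : Nat) : Int) = (pvPI cs).getD t 0 by omega]
      rw [hlen']
      -- the table update matches B's comprehension row
      rw [pvTbN_succ']
      have hciB := pvCiB cs (cs.getD (t + 1) ' ') hckmem
      rw [hciB, pvRowMap _ _ _ _ hrowlen hidx]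

-- ===== VERDICT (by name: the statement is the Claim_ definition above) =====
theorem getFAForSubstring_spec : Claim_equal_getFAForSubstring := by
  intro s _ hpre
  unfold Spec_getFAForSubstring
  have h : s.toList ≠ [] := by
    intro hh
    exact hpre (String.toList_eq_nil_iff.mp hh)
  rw [pvA_conn s h, pvB_conn s h, pvMain s.toList h _ (le_refl _)]
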